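-- pv_equiv track=rewrite | github.com/hunsang-you/daily | 24s/0302/G4_2로 몇 번 나누어질까.py | calc
-- ===== SOURCE A (Python) =====
-- def calc(n):
--     # 숫자가 0이면 나눌수 없음
--     if n == 0:
--         return 0
--
--     # 숫자가 1이면 2^0이므로 1
--     elif n == 1:
--         return 1
--
--     # 숫자가 짝수인 경우 계속 반복
--     elif n % 2 == 0:
--         return n // 2 + 2 * calc(n // 2)
--
--     # 1이 아닌 홀수인 경우 반복
--     else:
--         return (n // 2 + 1) + 2 * calc(n // 2)
-- ===== SOURCE B (Python) =====
-- def calc(n):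
--     result = 0
--     power = 1
--     while n > 0:
--         result += power * ((n + 1) // 2)
--         n //= 2
--         power *= 2
--     return result
-- ===== Notes on version B (the rewrite author's own statement) =====
-- stated objective: alternative
-- what changed: Replaced the recursion f(n)=n//2(+1)+2*f(n//2) by a single bottom-up loop maintaining an accumulator and a power-of-two weight, using the unified identity f(n)=(n+1)//2+2*f(n//2).
import Mathlib
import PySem

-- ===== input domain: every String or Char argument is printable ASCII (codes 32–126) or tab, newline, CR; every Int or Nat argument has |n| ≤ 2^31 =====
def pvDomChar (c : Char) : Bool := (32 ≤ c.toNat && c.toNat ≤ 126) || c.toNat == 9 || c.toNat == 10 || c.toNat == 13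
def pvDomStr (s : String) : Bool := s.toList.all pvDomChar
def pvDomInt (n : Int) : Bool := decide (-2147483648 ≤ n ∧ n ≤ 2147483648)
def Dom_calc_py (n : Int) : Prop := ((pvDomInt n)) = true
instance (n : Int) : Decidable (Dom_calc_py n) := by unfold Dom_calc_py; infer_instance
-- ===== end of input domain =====

-- B replaces A's recursion by one bottom-up loop with an accumulator and a power-of-two weight (alternative decomposition, same cost).
-- ===== PORT A =====
-- A's recursion, transcribed on the nonnegative domain via n.toNat (Pre_ restricts to n ≥ 0;
-- for nonnegative n Python's n // 2 and n % 2 coincide with Nat division/mod on n.toNat).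
def pvCalcNat (m : Nat) : Int :=
  if m = 0 then 0
  else if m = 1 then 1
  else if m % 2 = 0 then (m / 2 : Nat) + 2 * pvCalcNat (m / 2)
  else ((m / 2 : Nat) + 1) + 2 * pvCalcNat (m / 2)
termination_by m
decreasing_by all_goals omega

def calc_py (n : Int) : Int := pvCalcNat n.toNat

-- ===== PORT B =====
-- B's while-loop: state (n, power, result); loop condition n > 0; run on n.toNat (loop never runs for n ≤ 0).
def pvGo (m : Nat) (power result : Int) : Int :=
  if m = 0 then result
  else pvGo (m / 2) (power * 2) (result + power * ((m + 1 : Nat) / 2 : Nat))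
termination_by m
decreasing_by omega

def calc_py_alt (n : Int) : Int := pvGo n.toNat 1 0

-- ===== PRECONDITION & SPEC =====
-- Pre_ excludes negative n, on which A recurses forever (RecursionError); A returns on all n ≥ 0.
def Pre_calc_py (n : Int) : Prop := 0 ≤ n
instance (n : Int) : Decidable (Pre_calc_py n) := by unfold Pre_calc_py; infer_instance
def pvWitness_calc_py : Int := (12)

def Spec_calc_py (n : Int) (out : Int) : Prop := out = calc_py_alt n
instance (n : Int) (out : Int) : Decidable (Spec_calc_py n out) := by unfold Spec_calc_py; infer_instance

-- ===== CLAIM (what is proved, stated in full; the proofs are below) =====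
def Claim_equal_calc_py : Prop := ∀ (n : Int), Dom_calc_py n → Pre_calc_py n → Spec_calc_py n (calc_py n)

-- ===== LEMMAS AND PROOFS =====
-- For m ≥ 1 A's branches collapse to the single recurrence (m+1)/2 + 2·f(m/2).
lemma pvCalcNat_rec (m : Nat) (h : 1 ≤ m) :
    pvCalcNat m = ((m + 1) / 2 : Nat) + 2 * pvCalcNat (m / 2) := by
  rw [pvCalcNat]
  rcases Nat.eq_or_lt_of_le h with h1 | h1
  · simp [← h1, pvCalcNat]
  · have hm0 : m ≠ 0 := by omega
    have hm1 : m ≠ 1 := by omega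
    simp only [hm0, hm1, if_false]
    rcases Nat.even_or_odd m with he | ho
    · have : m % 2 = 0 := Nat.even_iff.mp he
      simp only [this, if_true]
      have : (m + 1) / 2 = m / 2 := by omega
      rw [this]
    · have h2 : m % 2 = 1 := Nat.odd_iff.mp ho
      simp only [h2, one_ne_zero, if_false]
      have hx : (m + 1) / 2 = m / 2 + 1 := by omega
      rw [hx]
      push_cast
      ring

-- Loop invariant: pvGo m p r = r + p · f(m).
lemma pvGo_eq (m : Nat) : ∀ (p r : Int), pvGo m p r = r + p * pvCalcNat m := by
  induction m using Nat.strong_induction_on with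
  | _ m ih =>
    intro p r
    rw [pvGo]
    by_cases h0 : m = 0
    · simp [h0, pvCalcNat]
    · simp only [h0, if_false]
      rw [ih (m / 2) (by omega)]
      rw [pvCalcNat_rec m (by omega)]
      ring

-- ===== VERDICT (by name: the statement is the Claim_ definition above) =====
theorem calc_py_spec : Claim_equal_calc_py := by
  intro n _ _
  show calc_py n = calc_py_alt n
  unfold calc_py calc_py_alt
  rw [pvGo_eq]
  ring
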